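-- pv_equiv track=rewrite | github.com/FaizanVirani06/insidersproject | insider_platform/db.py | _qmark_to_pct
-- ===== SOURCE A (Python) =====
-- from typing import Any, Dict, Iterator, List, Optional, Sequence, Tuple
--
-- def _qmark_to_pct(sql: str) -> str:
--     """Convert SQLite qmark placeholders (?) to psycopg2 placeholders (%s).
--
--     This is a lightweight conversion that avoids replacing '?' inside single/double-quoted
--     string literals. It's not a full SQL parser, but it is sufficient for this codebase.
--     """
--     out: List[str] = []
--     in_single = False
--     in_double = False
--     i = 0
--     while i < len(sql):
--         ch = sql[i]
--
--         if ch == "'" and not in_double: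
--             out.append(ch)
--             if in_single:
--                 # Escaped single quote: ''
--                 if i + 1 < len(sql) and sql[i + 1] == "'":
--                     out.append("'")
--                     i += 2
--                     continue
--                 in_single = False
--             else:
--                 in_single = True
--             i += 1
--             continue
--
--         if ch == '"' and not in_single:
--             out.append(ch)
--             if in_double:
--                 # Escaped double quote: ""
--                 if i + 1 < len(sql) and sql[i + 1] == '"':
--                     out.append('"')
--                     i += 2
--                     continue
--                 in_double = False
--             else:
--                 in_double = True
--             i += 1
--             continue
--
--         if ch == "?" and not in_single and not in_double:
--             out.append("%s")
--             i += 1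
--             continue
--
--         out.append(ch)
--         i += 1
--
--     return "".join(out)
-- ===== SOURCE B (Python) =====
-- def _qmark_to_pct(sql: str) -> str:
--     """Convert SQLite qmark placeholders (?) to psycopg2 placeholders (%s).
--
--     Tokenizer variant: consume each quoted literal (with its doubled-quote
--     escapes) as one slice, replace only bare '?' between literals.
--     """
--     n = len(sql)
--     out = []
--     i = 0
--     while i < n:
--         ch = sql[i]
--         if ch == "'" or ch == '"':
--             j = i + 1
--             while j < n:
--                 if sql[j] == ch:
--                     if j + 1 < n and sql[j + 1] == ch:
--                         j += 2
--                         continue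
--                     j += 1
--                     break
--                 j += 1
--             out.append(sql[i:j])
--             i = j
--         elif ch == "?":
--             out.append("%s")
--             i += 1
--         else:
--             out.append(ch)
--             i += 1
--     return "".join(out)
-- ===== Notes on version B (the rewrite author's own statement) =====
-- stated objective: alternative
-- what changed: Replaced the char-by-char loop with two boolean quote-state flags by a tokenizer that consumes each quoted literal (with doubled-quote escapes) as one whole slice and replaces only bare '?' between literals.
import Mathlib
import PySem

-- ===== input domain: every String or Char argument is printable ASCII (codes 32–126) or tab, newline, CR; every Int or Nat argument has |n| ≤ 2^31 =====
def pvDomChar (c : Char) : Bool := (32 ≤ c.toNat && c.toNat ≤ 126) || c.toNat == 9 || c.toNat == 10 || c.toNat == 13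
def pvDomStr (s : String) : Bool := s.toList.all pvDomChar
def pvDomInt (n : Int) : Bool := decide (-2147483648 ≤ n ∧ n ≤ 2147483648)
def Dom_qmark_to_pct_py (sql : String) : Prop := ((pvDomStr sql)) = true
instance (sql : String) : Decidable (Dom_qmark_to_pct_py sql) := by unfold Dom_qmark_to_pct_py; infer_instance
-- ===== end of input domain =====

-- B replaces A's flag-based state machine by a tokenizer that consumes each quoted
-- literal as one piece; objective: alternative (same O(n) cost, different structure).

-- ===== PORT A =====
-- A's while loop over index i with flags in_single/in_double, with the one-char
-- lookahead for doubled quotes; ported as recursion on the remaining character list.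
def qmarkALoop : List Char → Bool → Bool → List Char
  | [], _, _ => []
  | c :: rest, inS, inD =>
    if c = '\'' ∧ ¬inD then
      if inS then
        match rest with
        | c' :: rest' =>
          if c' = '\'' then c :: '\'' :: qmarkALoop rest' true inD
          else c :: qmarkALoop (c' :: rest') false inD
        | [] => [c]
      else c :: qmarkALoop rest true inD
    else if c = '"' ∧ ¬inS then
      if inD then
        match rest with
        | c' :: rest' =>
          if c' = '"' then c :: '"' :: qmarkALoop rest' inS true
          else c :: qmarkALoop (c' :: rest') inS false
        | [] => [c]
      else c :: qmarkALoop rest inS true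
    else if c = '?' ∧ ¬inS ∧ ¬inD then
      '%' :: 's' :: qmarkALoop rest inS inD
    else
      c :: qmarkALoop rest inS inD
  termination_by l _ _ => l.length
  decreasing_by all_goals (simp; try omega)

def qmark_to_pct_py (sql : String) : String :=
  String.ofList (qmarkALoop sql.toList false false)

-- ===== PORT B =====
-- B's inner while loop: scan a quoted literal opened by q, returning the consumed
-- characters (including the closing quote, if any) and the remainder.
def qmarkBScan : List Char → Char → List Char × List Char
  | [], _ => ([], [])
  | c :: rest, q =>
    if c = q then
      match rest with
      | c' :: rest' =>
        if c' = q then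
          let (t, r) := qmarkBScan rest' q
          (c :: c' :: t, r)
        else ([c], rest)
      | [] => ([c], [])
    else
      let (t, r) := qmarkBScan rest q
      (c :: t, r)
  termination_by l _ => l.length
  decreasing_by all_goals (simp; try omega)

theorem qmarkBScan_length (l : List Char) (q : Char) : (qmarkBScan l q).2.length ≤ l.length := by
  fun_induction qmarkBScan l q <;> simp_all <;> omega

-- B's outer while loop over tokens.
def qmarkBLoop : List Char → List Char
  | [] => []
  | c :: rest =>
    if c = '\'' ∨ c = '"' then
      c :: ((qmarkBScan rest c).1 ++ qmarkBLoop (qmarkBScan rest c).2)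
    else if c = '?' then '%' :: 's' :: qmarkBLoop rest
    else c :: qmarkBLoop rest
  termination_by l => l.length
  decreasing_by
    · have := qmarkBScan_length rest c
      simp; omega
    all_goals simp

def qmark_to_pct_py_alt (sql : String) : String :=
  String.ofList (qmarkBLoop sql.toList)

-- ===== PRECONDITION & SPEC =====
def Spec_qmark_to_pct_py (sql : String) (out : String) : Prop := out = qmark_to_pct_py_alt sql
instance (sql : String) (out : String) : Decidable (Spec_qmark_to_pct_py sql out) := by unfold Spec_qmark_to_pct_py; infer_instance

-- ===== CLAIM (what is proved, stated in full; the proofs are below) =====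
def Claim_equal_qmark_to_pct_py : Prop := ∀ (sql : String), Dom_qmark_to_pct_py sql → Spec_qmark_to_pct_py sql (qmark_to_pct_py sql)

-- ===== LEMMAS AND PROOFS =====

-- Inside a single-quoted literal, A's loop emits exactly what B's scanner consumes,
-- then continues in the neutral state.
theorem qmarkA_scan (q : Char) (inS inD : Bool)
    (hq : (q = '\'' ∧ inS = true ∧ inD = false) ∨ (q = '"' ∧ inS = false ∧ inD = true))
    (l : List Char) :
    qmarkALoop l inS inD =
      (qmarkBScan l q).1 ++ qmarkALoop (qmarkBScan l q).2 false false := by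
  fun_induction qmarkBScan l q <;>
    rcases hq with ⟨rfl, rfl, rfl⟩ | ⟨rfl, rfl, rfl⟩ <;>
    (try simp_all [qmarkALoop]) <;>
    (rw [qmarkALoop.eq_def]; simp_all)

theorem qmarkAB (l : List Char) : qmarkALoop l false false = qmarkBLoop l := by
  fun_induction qmarkBLoop l with
  | case1 => simp [qmarkALoop]
  | case2 c rest h ih =>
    rcases h with rfl | rfl
    · rw [qmarkALoop.eq_def]
      simp [qmarkA_scan _ _ _ (Or.inl ⟨rfl, rfl, rfl⟩) rest, ih]
    · rw [qmarkALoop.eq_def]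
      simp [qmarkA_scan _ _ _ (Or.inr ⟨rfl, rfl, rfl⟩) rest, ih]
  | case3 rest h ih => rw [qmarkALoop.eq_def]; simp_all
  | case4 c rest h h2 ih => rw [qmarkALoop.eq_def]; simp_all

-- ===== VERDICT (by name: the statement is the Claim_ definition above) =====
theorem qmark_to_pct_py_spec : Claim_equal_qmark_to_pct_py := by
  intro sql _
  unfold Spec_qmark_to_pct_py qmark_to_pct_py qmark_to_pct_py_alt
  rw [qmarkAB]
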